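-- pv_equiv track=rewrite | github.com/AWminer12/Groups-genarator | calculator.py | calculate_groups
-- ===== SOURCE A (Python) =====
-- from math import floor
--
-- def calculate_groups(num_people, num_groups):
--     num_people = int(num_people)
--     num_groups = int(num_groups)
--     group_size = floor(num_people/num_groups)
--     remainder = num_people%num_groups
--     result_groups = []
--     for i in range(0, num_groups):
--         g = group_size
--         if remainder > 0:
--             g += 1
--             remainder -= 1
--         result_groups.append(g)
--     return result_groups
-- ===== SOURCE B (Python) =====
-- def calculate_groups(num_people, num_groups):
--     # Greedy: repeatedly peel off one group of ceiling(average) size and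
--     # redistribute the rest among the remaining groups.
--     num_people = int(num_people)
--     num_groups = int(num_groups)
--     groups = []
--     while num_groups > 0:
--         g = -((-num_people) // num_groups)  # ceiling division
--         groups.append(g)
--         num_people -= g
--         num_groups -= 1
--     return groups
-- ===== Notes on version B (the rewrite author's own statement) =====
-- stated objective: alternative
-- what changed: Replaces A's single divmod followed by a loop with a decrementing remainder counter by a greedy algorithm: repeatedly peel off one group of ceiling(remaining_people/remaining_groups) size and recompute the division on the shrunken problem; correct because the ceiling of the average is exactly the largest balanced group size and subtracting it keeps the distribution balanced.
import Mathlib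
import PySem

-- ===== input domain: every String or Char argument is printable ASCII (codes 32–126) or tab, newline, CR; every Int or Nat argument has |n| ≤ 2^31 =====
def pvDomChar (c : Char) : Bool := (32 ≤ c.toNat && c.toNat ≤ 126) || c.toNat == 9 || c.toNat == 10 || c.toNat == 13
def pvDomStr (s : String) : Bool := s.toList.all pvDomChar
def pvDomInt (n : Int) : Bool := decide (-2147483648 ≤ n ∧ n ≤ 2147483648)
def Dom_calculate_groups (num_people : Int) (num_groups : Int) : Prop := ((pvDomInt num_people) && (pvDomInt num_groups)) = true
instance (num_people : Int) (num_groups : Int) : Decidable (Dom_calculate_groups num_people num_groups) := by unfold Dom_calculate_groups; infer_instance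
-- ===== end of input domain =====

-- B replaces A's divmod-plus-counter loop by a greedy peel: each step takes one group of
-- ceiling(remaining_people/remaining_groups) and recurses on the rest; objective: alternative.


-- ===== PORT A =====
-- floor(num_people/num_groups) uses float division in Python; for |num_people| ≤ 2^31 (the Dom
-- bound) the float result is rounded to a value whose floor equals the exact floor, so it is
-- ported as PySem.Int.floordiv (exact on Dom).
def calculate_groups (num_people : Int) (num_groups : Int) : List Int :=
  let group_size := PySem.Int.floordiv num_people num_groups
  let remainder := PySem.Int.mod num_people num_groups
  let st := (PySem.List.pyRange 0 num_groups 1).foldl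
    (fun (st : Int × List Int) _ =>
      let g := group_size
      if st.1 > 0 then (st.1 - 1, st.2 ++ [g + 1]) else (st.1, st.2 ++ [g]))
    (remainder, ([] : List Int))
  st.2

-- ===== PORT B =====
-- B's while loop: peel one group of ceiling size, shrink the problem, repeat.
def calcPeel (num_people : Int) (num_groups : Int) (groups : List Int) : List Int :=
  if _h : num_groups > 0 then
    let g := -(PySem.Int.floordiv (-num_people) num_groups)   -- ceiling division
    calcPeel (num_people - g) (num_groups - 1) (groups ++ [g])
  else groups
termination_by num_groups.toNat
decreasing_by omega

def calculate_groups_alt (num_people : Int) (num_groups : Int) : List Int :=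
  calcPeel num_people num_groups []

-- ===== PRECONDITION & SPEC =====
-- Pre_ excludes only num_groups = 0, where Python A raises ZeroDivisionError.
def Pre_calculate_groups (_num_people : Int) (num_groups : Int) : Prop := num_groups ≠ 0
instance (num_people : Int) (num_groups : Int) : Decidable (Pre_calculate_groups num_people num_groups) := by unfold Pre_calculate_groups; infer_instance
def pvWitness_calculate_groups : Int × Int := (10, 3)

def Spec_calculate_groups (num_people : Int) (num_groups : Int) (out : List Int) : Prop := out = calculate_groups_alt num_people num_groups
instance (num_people : Int) (num_groups : Int) (out : List Int) : Decidable (Spec_calculate_groups num_people num_groups out) := by unfold Spec_calculate_groups; infer_instance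

-- ===== CLAIM (what is proved, stated in full; the proofs are below) =====
def Claim_equal_calculate_groups : Prop := ∀ (num_people : Int) (num_groups : Int), Dom_calculate_groups num_people num_groups → Pre_calculate_groups num_people num_groups → Spec_calculate_groups num_people num_groups (calculate_groups num_people num_groups)

-- ===== LEMMAS AND PROOFS =====

-- A's loop, run over any list of length n with remainder counter r (0 ≤ r ≤ n), appends
-- r copies of q+1 followed by n - r copies of q.
theorem pv_loop_blocks (q : Int) (l : List Int) (r : Int) (acc : List Int)
    (h0 : 0 ≤ r) (h1 : r ≤ (l.length : Int)) :
    (l.foldl (fun (st : Int × List Int) _ =>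
        if st.1 > 0 then (st.1 - 1, st.2 ++ [q + 1]) else (st.1, st.2 ++ [q])) (r, acc)).2
      = acc ++ List.replicate r.toNat (q + 1) ++ List.replicate (l.length - r.toNat) q := by
  induction l generalizing r acc with
  | nil =>
    have : r = 0 := by simpa using le_antisymm h1 h0
    simp [this]
  | cons x xs ih =>
    simp only [List.foldl_cons, List.length_cons]
    by_cases hr : r > 0
    · rw [if_pos hr]
      rw [ih (r - 1) (acc ++ [q + 1]) (by omega) (by simp only [List.length_cons] at h1; push_cast at h1 ⊢; omega)]
      have hrt : r.toNat = (r - 1).toNat + 1 := by omega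
      rw [hrt]
      have hlen : xs.length + 1 - ((r - 1).toNat + 1) = xs.length - (r - 1).toNat := by omega
      simp [List.replicate_succ, List.append_assoc]
    · rw [if_neg hr]
      have hr0 : r = 0 := by omega
      subst hr0
      rw [ih 0 (acc ++ [q]) (by omega) (by exact_mod_cast Nat.zero_le _)]
      simp [List.replicate_succ, List.append_assoc]

-- B's peel loop, for k > 0, also appends r copies of q+1 followed by k - r copies of q,
-- where q = floor(n/k) and r = n mod k.
theorem pv_peel_blocks (k : Int) (hk : 0 < k) : ∀ (n : Int) (acc : List Int),
    calcPeel n k acc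
      = acc ++ List.replicate (PySem.Int.mod n k).toNat (PySem.Int.floordiv n k + 1)
            ++ List.replicate (k - PySem.Int.mod n k).toNat (PySem.Int.floordiv n k) := by
  have hk1 : 1 ≤ k := hk
  induction k, hk1 using Int.le_induction with
  | base =>
    intro n acc
    rw [calcPeel, dif_pos (by omega : (1:Int) > 0)]
    rw [calcPeel, dif_neg (by omega : ¬ ((1:Int) - 1 > 0))]
    simp
  | succ k hk1 ih =>
    intro n acc
    -- k + 1 > 1 groups remain
    have hkp : (0:Int) < k + 1 := by omega
    set q := PySem.Int.floordiv n (k + 1) with hq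
    set r := PySem.Int.mod n (k + 1) with hr
    have heq : q * (k + 1) + r = n := PySem.Int.floordiv_mul_add_mod n (k + 1)
    have hexp : q * (k + 1) = q * k + q := by ring
    have hr0 : 0 ≤ r := PySem.Int.mod_nonneg n hkp
    have hrk : r < k + 1 := PySem.Int.mod_lt n hkp
    rw [calcPeel, dif_pos (by omega : k + 1 > 0)]
    by_cases hrpos : 0 < r
    · -- first group gets q + 1; remaining n - (q+1) over k groups has floor q, mod r - 1
      have hg : -(PySem.Int.floordiv (-n) (k + 1)) = q + 1 := by
        rw [PySem.Int.neg_floordiv_neg_eq_iff_of_pos hkp]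
        constructor <;> nlinarith
      have hq' : PySem.Int.floordiv (n - (q + 1)) k = q := by
        rw [PySem.Int.floordiv_eq_iff_of_pos hk1]
        constructor <;> nlinarith
      have hr' : PySem.Int.mod (n - (q + 1)) k = r - 1 := by
        have := PySem.Int.floordiv_mul_add_mod (n - (q + 1)) k
        rw [hq'] at this; omega
      have : k + 1 - 1 = k := by ring
      rw [hg, this, ih (by omega), hq', hr']
      have h1 : r.toNat = (r - 1).toNat + 1 := by omega
      have h2 : (k - (r - 1)).toNat = (k + 1 - r).toNat := by omega
      rw [h1, h2]
      simp [List.replicate_succ, List.append_assoc]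
    · -- r = 0: first group gets q; remaining q * k over k groups has floor q, mod 0
      have hr00 : r = 0 := by omega
      have hg : -(PySem.Int.floordiv (-n) (k + 1)) = q := by
        rw [PySem.Int.neg_floordiv_neg_eq_iff_of_pos hkp]
        constructor <;> nlinarith
      have hq' : PySem.Int.floordiv (n - q) k = q := by
        rw [PySem.Int.floordiv_eq_iff_of_pos hk1]
        constructor <;> nlinarith
      have hr' : PySem.Int.mod (n - q) k = 0 := by
        have := PySem.Int.floordiv_mul_add_mod (n - q) k
        rw [hq'] at this; omega
      have hk' : k + 1 - 1 = k := by ring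
      rw [hg, hk', ih (by omega), hq', hr']
      rw [hr00]
      have h2 : (k + 1 - (0:Int)).toNat = (k - (0:Int)).toNat + 1 := by omega
      rw [h2]
      simp [List.replicate_succ, List.append_assoc]

-- ===== VERDICT (by name: the statement is the Claim_ definition above) =====
theorem calculate_groups_spec : Claim_equal_calculate_groups := by
  intro a b _ hb
  unfold Pre_calculate_groups at hb
  unfold Spec_calculate_groups calculate_groups calculate_groups_alt
  simp only []
  by_cases hbp : 0 < b
  · set q := PySem.Int.floordiv a b with hq
    set r := PySem.Int.mod a b with hr
    have hr0 : 0 ≤ r := PySem.Int.mod_nonneg a hbp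
    have hrb : r < b := PySem.Int.mod_lt a hbp
    have hlen : ((PySem.List.pyRange 0 b 1).length : Int) = b := by
      rw [PySem.List.length_pyRange_one]; omega
    rw [pv_loop_blocks q _ r [] hr0 (by rw [hlen]; omega)]
    rw [pv_peel_blocks b hbp a []]
    have h1 : (PySem.List.pyRange 0 b 1).length = b.toNat := by
      rw [PySem.List.length_pyRange_one]; omega
    have h2 : b.toNat - r.toNat = (b - r).toNat := by omega
    simp [h1, h2]
    rw [← hq, ← hr]
  · -- b < 0: A's loop range is empty and B's while condition is false at once.
    have hbn : b < 0 := by omega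
    have h1 : PySem.List.pyRange 0 b 1 = [] := PySem.List.pyRange_one_eq_nil hbn.le
    rw [calcPeel, dif_neg (by omega : ¬ b > 0)]
    simp [h1]
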